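-- pv_equiv track=rewrite | github.com/jfisteus/eyegrade | eyegrade/create/latex.py | _create_infobits
-- ===== SOURCE A (Python) =====
-- def _create_infobits(bits, num_tables, num_choices, survey_mode):
--     column_active = r"\multicolumn{1}{c}{$\blacksquare$}"
--     column_inactive = r"\multicolumn{1}{c}{}"
--     parts = [[], []]
--     for i in range(0, num_tables):
--         data = bits[i * num_choices : (i + 1) * num_choices]
--         for j in (0, 1):
--             val = j == 1
--             components = [column_inactive]
--             for bit in data:
--                 if not survey_mode and val ^ bit:
--                     components.append(column_active)
--                 else:
--                     components.append(column_inactive)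
--             parts[j].append(" & ".join(components))
--     return parts
-- ===== SOURCE B (Python) =====
-- def _row_pair(data, survey_mode, active, inactive):
--     # one pass over the table's bits building both complementary rows at once
--     row0, row1 = [inactive], [inactive]
--     for bit in data:
--         if survey_mode:
--             row0.append(inactive)
--             row1.append(inactive)
--         elif bit:
--             row0.append(active)
--             row1.append(inactive)
--         else:
--             row0.append(inactive)
--             row1.append(active)
--     return " & ".join(row0), " & ".join(row1)
--
--
-- def _create_infobits(bits, num_tables, num_choices, survey_mode):
--     active = r"\multicolumn{1}{c}{$\blacksquare$}"
--     inactive = r"\multicolumn{1}{c}{}"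
--     rows = [
--         _row_pair(bits[i * num_choices : (i + 1) * num_choices], survey_mode, active, inactive)
--         for i in range(num_tables)
--     ]
--     return [[r[0] for r in rows], [r[1] for r in rows]]
-- ===== Notes on version B (the rewrite author's own statement) =====
-- stated objective: simpler
-- what changed: Replaces the two per-table j-passes with the val^bit parity trick by a single pass that builds both complementary rows at once, and replaces the appended-to parts accumulator by a comprehension over table pairs that is unzipped at the end.
import Mathlib
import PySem

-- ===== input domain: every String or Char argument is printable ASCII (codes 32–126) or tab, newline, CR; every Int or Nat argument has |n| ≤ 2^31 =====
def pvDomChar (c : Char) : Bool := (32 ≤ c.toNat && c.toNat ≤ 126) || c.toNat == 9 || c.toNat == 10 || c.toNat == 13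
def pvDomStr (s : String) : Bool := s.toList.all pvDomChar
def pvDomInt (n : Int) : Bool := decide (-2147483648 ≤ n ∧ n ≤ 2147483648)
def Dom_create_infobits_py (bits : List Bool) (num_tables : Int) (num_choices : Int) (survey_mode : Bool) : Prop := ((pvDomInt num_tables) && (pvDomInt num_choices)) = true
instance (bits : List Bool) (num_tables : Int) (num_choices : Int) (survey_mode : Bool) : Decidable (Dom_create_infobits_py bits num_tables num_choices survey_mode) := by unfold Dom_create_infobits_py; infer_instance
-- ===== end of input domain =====

-- B builds both complementary rows of each table in ONE pass (no val^bit parity trick, no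
-- second j-pass) and unzips the per-table pairs at the end; same cost, simpler decomposition.

-- ===== PORT A =====
-- parts = [[], []] is kept as a pair of lists; the 'for j in (0, 1)' loop is a fold over
-- [false, true] (val = j == 1), appending to the j-th component.
def create_infobits_py (bits : List Bool) (num_tables : Int) (num_choices : Int) (survey_mode : Bool) : List (List String) :=
  let column_active := "\\multicolumn{1}{c}{$\\blacksquare$}"
  let column_inactive := "\\multicolumn{1}{c}{}"
  let parts : List String × List String :=
    (PySem.List.pyRange 0 num_tables 1).foldl
      (fun parts i =>
        let data := PySem.List.slice bits (some (i * num_choices)) (some ((i + 1) * num_choices))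
        [false, true].foldl
          (fun parts val =>
            let components := data.foldl
              (fun components bit =>
                if !survey_mode && (val != bit) then components ++ [column_active]
                else components ++ [column_inactive])
              [column_inactive]
            if val then (parts.1, parts.2 ++ [PySem.Str.join " & " components])
            else (parts.1 ++ [PySem.Str.join " & " components], parts.2))
          parts)
      ([], [])
  [parts.1, parts.2]

-- ===== PORT B =====
-- B-side helper: one pass over a table's bits building both rows at once.
def ciRowPair (data : List Bool) (survey_mode : Bool) (active inactive : String) : String × String :=
  let r := data.foldl
    (fun (r : List String × List String) bit =>
      if survey_mode then (r.1 ++ [inactive], r.2 ++ [inactive])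
      else if bit then (r.1 ++ [active], r.2 ++ [inactive])
      else (r.1 ++ [inactive], r.2 ++ [active]))
    ([inactive], [inactive])
  (PySem.Str.join " & " r.1, PySem.Str.join " & " r.2)

def create_infobits_py_alt (bits : List Bool) (num_tables : Int) (num_choices : Int) (survey_mode : Bool) : List (List String) :=
  let active := "\\multicolumn{1}{c}{$\\blacksquare$}"
  let inactive := "\\multicolumn{1}{c}{}"
  let rows := (PySem.List.pyRange 0 num_tables 1).map
    (fun i => ciRowPair (PySem.List.slice bits (some (i * num_choices)) (some ((i + 1) * num_choices))) survey_mode active inactive)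
  [rows.map Prod.fst, rows.map Prod.snd]

-- ===== PRECONDITION & SPEC =====
def Spec_create_infobits_py (bits : List Bool) (num_tables : Int) (num_choices : Int) (survey_mode : Bool) (out : List (List String)) : Prop := out = create_infobits_py_alt bits num_tables num_choices survey_mode
instance (bits : List Bool) (num_tables : Int) (num_choices : Int) (survey_mode : Bool) (out : List (List String)) : Decidable (Spec_create_infobits_py bits num_tables num_choices survey_mode out) := by unfold Spec_create_infobits_py; infer_instance

-- ===== CLAIM (what is proved, stated in full; the proofs are below) =====
def Claim_equal_create_infobits_py : Prop := ∀ (bits : List Bool) (num_tables : Int) (num_choices : Int) (survey_mode : Bool), Dom_create_infobits_py bits num_tables num_choices survey_mode → Spec_create_infobits_py bits num_tables num_choices survey_mode (create_infobits_py bits num_tables num_choices survey_mode)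

-- ===== LEMMAS AND PROOFS =====

-- generic: a fold that appends one element per item to each component of a pair is a pair of maps.
theorem ciFoldPair_eq_map (f g : Bool → String) :
    ∀ (t : List Bool) (a0 a1 : List String),
      t.foldl (fun (r : List String × List String) b => (r.1 ++ [f b], r.2 ++ [g b])) (a0, a1)
        = (a0 ++ t.map f, a1 ++ t.map g) := by
  intro t
  induction t with
  | nil => simp
  | cons b t ih => intro a0 a1; rw [List.foldl_cons, ih]; simp

-- A's inner bit loop is 'append one string per bit': accumulator plus a map.
theorem ciFoldA_eq_map (sm val : Bool) (ca ci : String) (data : List Bool) (acc : List String) :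
    data.foldl (fun components bit =>
        if !sm && (val != bit) then components ++ [ca] else components ++ [ci]) acc
      = acc ++ data.map (fun bit => if !sm && (val != bit) then ca else ci) := by
  have hf : (fun (components : List String) bit =>
        if !sm && (val != bit) then components ++ [ca] else components ++ [ci])
      = fun (components : List String) bit =>
        components ++ [if !sm && (val != bit) then ca else ci] := by
    funext c b
    by_cases h : (!sm && (val != b)) = true <;> simp [h]
  rw [hf, PySem.List.foldl_append_singleton_eq_map]

-- B's one-pass pair fold as a pair of maps.
theorem ciRowPair_eq (data : List Bool) (sm : Bool) (ca ci : String) :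
    ciRowPair data sm ca ci
      = (PySem.Str.join " & " ([ci] ++ data.map (fun bit => if !sm && (false != bit) then ca else ci)),
         PySem.Str.join " & " ([ci] ++ data.map (fun bit => if !sm && (true != bit) then ca else ci))) := by
  unfold ciRowPair
  have hg : (fun (r : List String × List String) bit =>
        if sm then (r.1 ++ [ci], r.2 ++ [ci])
        else if bit then (r.1 ++ [ca], r.2 ++ [ci])
        else (r.1 ++ [ci], r.2 ++ [ca]))
      = fun (r : List String × List String) bit =>
        (r.1 ++ [if !sm && (false != bit) then ca else ci],
         r.2 ++ [if !sm && (true != bit) then ca else ci]) := by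
    funext r b
    cases sm <;> cases b <;> simp
  rw [hg, ciFoldPair_eq_map]

-- per table: A's two j-passes give exactly B's pair.
theorem ciTable_eq (data : List Bool) (sm : Bool) (ca ci : String) (p : List String × List String) :
    ([false, true].foldl
        (fun (parts : List String × List String) val =>
          let components := data.foldl
            (fun components bit =>
              if !sm && (val != bit) then components ++ [ca] else components ++ [ci])
            [ci]
          if val then (parts.1, parts.2 ++ [PySem.Str.join " & " components])
          else (parts.1 ++ [PySem.Str.join " & " components], parts.2)) p)
      = (p.1 ++ [(ciRowPair data sm ca ci).1], p.2 ++ [(ciRowPair data sm ca ci).2]) := by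
  simp only [List.foldl_cons, List.foldl_nil, ciFoldA_eq_map, ciRowPair_eq]
  simp

-- the outer fold over the tables is the unzip of the mapped pairs.
theorem ciOuter_eq (bits : List Bool) (nc : Int) (sm : Bool) (ca ci : String) :
    ∀ (L : List Int) (a0 a1 : List String),
      L.foldl
        (fun (parts : List String × List String) i =>
          let data := PySem.List.slice bits (some (i * nc)) (some ((i + 1) * nc))
          [false, true].foldl
            (fun parts val =>
              let components := data.foldl
                (fun components bit =>
                  if !sm && (val != bit) then components ++ [ca] else components ++ [ci])
                [ci]
              if val then (parts.1, parts.2 ++ [PySem.Str.join " & " components])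
              else (parts.1 ++ [PySem.Str.join " & " components], parts.2))
            parts) (a0, a1)
        = (a0 ++ (L.map (fun i => ciRowPair (PySem.List.slice bits (some (i * nc)) (some ((i + 1) * nc))) sm ca ci)).map Prod.fst,
           a1 ++ (L.map (fun i => ciRowPair (PySem.List.slice bits (some (i * nc)) (some ((i + 1) * nc))) sm ca ci)).map Prod.snd) := by
  intro L
  induction L with
  | nil => simp
  | cons i t ih =>
      intro a0 a1
      rw [List.foldl_cons]
      show List.foldl _ ([false, true].foldl _ (a0, a1)) t = _
      rw [ciTable_eq]
      rw [ih]
      simp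

-- ===== VERDICT (by name: the statement is the Claim_ definition above) =====
theorem create_infobits_py_spec : Claim_equal_create_infobits_py := by
  intro bits nt nc sm _
  show _ = _
  simp only [create_infobits_py, create_infobits_py_alt]
  rw [ciOuter_eq]
  simp
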